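-- pv_equiv track=rewrite | github.com/RobbinBaauw/FoobarChallenge | python/challenge3b.py | group_terminals
-- ===== SOURCE A (Python) =====
-- def swap_rows_and_cols(m, i, j):
--     n = []
--     size = len(m)
--
--     for r_i in range(size):
--         new_row = []
--
--         current_row = m[r_i]
--         if r_i == i:
--             current_row = m[j]
--         elif r_i == j:
--             current_row = m[i]
--
--         for c_i in range(size):
--             current_column = current_row[c_i]
--             if c_i == i:
--                 current_column = current_row[j]
--             elif c_i == j:
--                 current_column = current_row[i]
--
--             new_row.append(current_column)
--         n.append(new_row)
--
--     return n
--
-- def group_terminals(m):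
--     size = len(m)
--
--     previous_zero_r_i = -1
--     for r_i in range(size):
--         row_sum = sum(m[r_i])
--         if row_sum == 0:
--             previous_zero_r_i = r_i
--         elif row_sum != 0 and previous_zero_r_i > -1:
--             n = swap_rows_and_cols(m, r_i, previous_zero_r_i)
--             return group_terminals(n)
--
--     return m
-- ===== SOURCE B (Python) =====
-- def group_terminals(m):
--     # Stable partition of the indices: nonzero-sum rows first, zero-sum rows last,
--     # then apply the symmetric permutation P*M*P^T in a single pass.
--     n = len(m)
--     perm = [i for i in range(n) if sum(m[i]) != 0] + [i for i in range(n) if sum(m[i]) == 0]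
--     if perm == list(range(n)):
--         # already grouped: nothing to permute
--         return m
--     return [[m[i][j] for j in perm] for i in perm]
-- ===== Notes on version B (the rewrite author's own statement) =====
-- stated objective: alternative
-- what changed: A bubble-sorts the matrix by repeated adjacent symmetric row/column swaps, rebuilding and rescanning the whole matrix on every swap (recursing each time); B computes the stable partition permutation of the indices once and applies P*M*P^T in a single pass (returning m unchanged when the rows are already grouped). Pre_ admits matrices that are already grouped (A returns them untouched, any shape) or square, the natural domain of this symmetric row/column permutation; …
import Mathlib
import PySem

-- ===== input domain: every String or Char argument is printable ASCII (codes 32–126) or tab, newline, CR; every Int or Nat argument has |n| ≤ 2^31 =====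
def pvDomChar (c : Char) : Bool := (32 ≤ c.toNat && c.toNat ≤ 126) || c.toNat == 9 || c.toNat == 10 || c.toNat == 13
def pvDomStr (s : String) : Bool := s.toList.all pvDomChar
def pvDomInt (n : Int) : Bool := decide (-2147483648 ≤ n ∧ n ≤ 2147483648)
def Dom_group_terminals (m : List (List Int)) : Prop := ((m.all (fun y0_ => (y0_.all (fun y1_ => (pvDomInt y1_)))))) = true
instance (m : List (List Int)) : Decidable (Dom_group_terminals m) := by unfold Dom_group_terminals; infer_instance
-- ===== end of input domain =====

-- ===== PORT A =====
-- A bubble-sorts zero-sum rows to the bottom by repeated symmetric adjacent swaps.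
-- Equivalence is about the return value; neither program mutates its argument.

-- sum of row k (Python: sum(m[k]))
def rowS (m : List (List Int)) (k : Nat) : Int := (m.getD k []).sum

def swap_rows_and_cols (m : List (List Int)) (i j : Nat) : List (List Int) :=
  let size := m.length
  (List.range size).map (fun r_i =>
    let current_row := if r_i = i then m.getD j [] else if r_i = j then m.getD i [] else m.getD r_i []
    (List.range size).map (fun c_i =>
      if c_i = i then current_row.getD j 0 else if c_i = j then current_row.getD i 0 else current_row.getD c_i 0))

-- the scan of A's for-loop: prev = last zero-sum index seen (None = -1);
-- returns the first (r_i, previous_zero_r_i) pair on which A swaps and recurses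
def findSwap (m : List (List Int)) : List Nat → Option Nat → Option (Nat × Nat)
  | [], _ => none
  | r :: rest, prev =>
    if rowS m r = 0 then findSwap m rest (some r)
    else
      match prev with
      | some z => some (r, z)
      | none => findSwap m rest none

-- termination helpers (cited by name in decreasing_by)
def squareB (m : List (List Int)) : Bool := m.all (fun row => row.length == m.length)

def muA (m : List (List Int)) : Nat :=
  ∑ k ∈ Finset.range m.length, (if rowS m k ≠ 0 then k else 0)

lemma findSwap_spec (m : List (List Int)) :
    ∀ (len s : Nat) (prev : Option Nat) (r z : Nat),
    (∀ p, prev = some p → p + 1 = s ∧ rowS m p = 0) →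
    findSwap m (List.range' s len) prev = some (r, z) →
    z + 1 = r ∧ rowS m z = 0 ∧ rowS m r ≠ 0 ∧ r < s + len := by
  intro len
  induction len with
  | zero => intro s prev r z _ h; simp [findSwap] at h
  | succ n ih =>
    intro s prev r z hinv h
    rw [List.range'_succ] at h
    by_cases h0 : rowS m s = 0
    · simp only [findSwap, h0] at h
      have := ih (s+1) (some s) r z (by intro p hp; cases hp; exact ⟨rfl, h0⟩) (by simpa using h)
      exact ⟨this.1, this.2.1, this.2.2.1, by omega⟩
    · simp only [findSwap, if_neg h0] at h
      cases prev with
      | none =>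
        have := ih (s+1) none r z (by intro p hp; cases hp) h
        exact ⟨this.1, this.2.1, this.2.2.1, by omega⟩
      | some z0 =>
        simp at h
        obtain ⟨hr, hz⟩ := h
        obtain ⟨h1, h2⟩ := hinv z0 rfl
        subst hr; subst hz
        exact ⟨h1, h2, h0, by omega⟩

lemma range_map_getD {α : Type} (l : List α) (d : α) :
    (List.range l.length).map (fun c => l.getD c d) = l := by
  apply List.ext_getElem
  · simp
  · intro i h1 h2
    simp [List.getD_eq_getElem?_getD, List.getElem?_eq_getElem h2]

lemma swapRC_getD (m : List (List Int)) (r z k : Nat) (hk : k < m.length) :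
    (swap_rows_and_cols m r z).getD k [] =
      (List.range m.length).map (fun c =>
        (m.getD (Equiv.swap r z k) []).getD (Equiv.swap r z c) 0) := by
  unfold swap_rows_and_cols
  simp only []
  rw [List.getD_eq_getElem?_getD, List.getElem?_map, List.getElem?_range hk]
  simp only [Option.map_some, Option.getD_some]
  have hrow : (if k = r then m.getD z [] else if k = z then m.getD r [] else m.getD k [])
      = m.getD (Equiv.swap r z k) [] := by
    rw [Equiv.swap_apply_def]; split_ifs <;> rfl
  congr 1
  funext c
  rw [hrow]
  simp only [Equiv.swap_apply_def]
  split_ifs <;> rfl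

def SquareP (m : List (List Int)) : Prop := ∀ row ∈ m, row.length = m.length

lemma square_row_len (m : List (List Int)) (hsq : SquareP m) (k : Nat) (hk : k < m.length) :
    (m.getD k []).length = m.length := by
  have : m.getD k [] ∈ m := by
    rw [List.getD_eq_getElem?_getD, List.getElem?_eq_getElem hk]
    exact List.getElem_mem hk
  exact hsq _ this

lemma sum_eq_range_sum (l : List Int) :
    l.sum = ∑ c ∈ Finset.range l.length, l.getD c 0 := by
  conv_lhs => rw [← range_map_getD l 0]
  rw [Finset.sum_range, ← List.sum_ofFn]
  congr 1
  apply List.ext_getElem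
  · simp
  · intro i h1 h2
    simp [List.getD_eq_getElem?_getD, List.getElem?_eq_getElem (by simpa using h1)]

lemma swap_mem_range (r z : Nat) (hr : r < n) (hz : z < n) (k : Nat) :
    k < n → Equiv.swap r z k < n := by
  intro hk
  rw [Equiv.swap_apply_def]
  split_ifs <;> omega

lemma rowS_swap (m : List (List Int)) (r z k : Nat) (hsq : SquareP m)
    (hr : r < m.length) (hz : z < m.length) (hk : k < m.length) :
    rowS (swap_rows_and_cols m r z) k = rowS m (Equiv.swap r z k) := by
  unfold rowS
  rw [swapRC_getD m r z k hk]
  set f : Nat → Int := fun c => (m.getD (Equiv.swap r z k) []).getD c 0 with hf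
  have h1 : ((List.range m.length).map (fun c => f (Equiv.swap r z c))).sum
      = ∑ c ∈ Finset.range m.length, f (Equiv.swap r z c) := by
    rw [Finset.sum_range, ← List.sum_ofFn]
    congr 1
    apply List.ext_getElem <;> simp
  rw [h1]
  have h2 : ∑ c ∈ Finset.range m.length, f (Equiv.swap r z c)
      = ∑ c ∈ Finset.range m.length, f c := by
    apply Finset.sum_nbij' (fun c => Equiv.swap r z c) (fun c => Equiv.swap r z c)
    · intro a ha; rw [Finset.mem_range] at *; exact swap_mem_range r z hr hz a ha
    · intro a ha; rw [Finset.mem_range] at *; exact swap_mem_range r z hr hz a ha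
    · intro a _; simp
    · intro a _; simp
    · intro a _; rfl
  rw [h2]
  have hlen := square_row_len m hsq (Equiv.swap r z k) (swap_mem_range r z hr hz k hk)
  rw [sum_eq_range_sum, hlen]

lemma swapRC_square (m : List (List Int)) (r z : Nat) :
    SquareP (swap_rows_and_cols m r z) ∧ (swap_rows_and_cols m r z).length = m.length := by
  constructor
  · intro row hrow
    unfold swap_rows_and_cols at hrow ⊢
    simp only [List.mem_map] at hrow
    obtain ⟨i, _, hi⟩ := hrow
    simp [← hi]
  · unfold swap_rows_and_cols; simp

lemma squareB_iff (m : List (List Int)) : squareB m = true ↔ SquareP m := by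
  unfold squareB SquareP
  simp

lemma muA_swap_lt (m : List (List Int)) (r z : Nat) (hsq : SquareP m)
    (hzr : z + 1 = r) (hr : r < m.length)
    (hz0 : rowS m z = 0) (hr0 : rowS m r ≠ 0) :
    muA (swap_rows_and_cols m r z) < muA m := by
  have hz : z < m.length := by omega
  have hlen := (swapRC_square m r z).2
  have hne : z ≠ r := by omega
  unfold muA
  rw [hlen]
  have hstep : ∀ k ∈ Finset.range m.length,
      (if rowS (swap_rows_and_cols m r z) k ≠ 0 then k else 0)
        = (if rowS m (Equiv.swap r z k) ≠ 0 then k else 0) := by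
    intro k hk
    rw [Finset.mem_range] at hk
    rw [rowS_swap m r z k hsq hr hz hk]
  rw [Finset.sum_congr rfl hstep]
  have hrmem : r ∈ Finset.range m.length := Finset.mem_range.mpr hr
  have hzmem : z ∈ (Finset.range m.length).erase r := by
    rw [Finset.mem_erase]; exact ⟨hne, Finset.mem_range.mpr hz⟩
  rw [← Finset.add_sum_erase _ _ hrmem, ← Finset.add_sum_erase _ _ hzmem]
  conv_rhs => rw [← Finset.add_sum_erase _ (fun k => if rowS m k ≠ 0 then k else 0) hrmem,
    ← Finset.add_sum_erase _ _ hzmem]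
  have hcong : ∑ k ∈ ((Finset.range m.length).erase r).erase z,
      (if rowS m (Equiv.swap r z k) ≠ 0 then k else 0)
      = ∑ k ∈ ((Finset.range m.length).erase r).erase z,
      (if rowS m k ≠ 0 then k else 0) := by
    apply Finset.sum_congr rfl
    intro k hk
    rw [Finset.mem_erase, Finset.mem_erase] at hk
    rw [Equiv.swap_apply_of_ne_of_ne hk.2.1 hk.1]
  rw [hcong]
  have e1 : Equiv.swap r z r = z := Equiv.swap_apply_left r z
  have e2 : Equiv.swap r z z = r := Equiv.swap_apply_right r z
  rw [e1, e2]
  have hz' : ¬ (rowS m z ≠ 0) := by simp [hz0]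
  rw [if_neg hz', if_neg hz', if_pos hr0, if_pos hr0]
  omega

def group_terminals (m : List (List Int)) : List (List Int) :=
  match h : findSwap m (List.range m.length) none with
  | none => m
  | some (r, z) => group_terminals (swap_rows_and_cols m r z)
termination_by ((if squareB m then 0 else 1 : Nat), muA m)
decreasing_by
  have hspec := findSwap_spec m m.length 0 none r z (by intro p hp; cases hp)
    (by rwa [← List.range_eq_range'])
  obtain ⟨hzr, hz0, hr0, hrn⟩ := hspec
  by_cases hsq : squareB m = true
  · have hsq' : squareB (swap_rows_and_cols m r z) = true := by
      rw [squareB_iff]; exact (swapRC_square m r z).1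
    rw [if_pos hsq, if_pos hsq']
    exact Prod.Lex.right 0 (muA_swap_lt m r z ((squareB_iff m).mp hsq) hzr (by omega) hz0 hr0)
  · have hsq' : squareB (swap_rows_and_cols m r z) = true := by
      rw [squareB_iff]; exact (swapRC_square m r z).1
    rw [if_pos hsq', if_neg hsq]
    exact Prod.Lex.left _ _ (by omega)

-- ===== PORT B =====
def group_terminals_alt (m : List (List Int)) : List (List Int) :=
  let perm := (List.range m.length).filter (fun i => decide ((m.getD i []).sum ≠ 0))
    ++ (List.range m.length).filter (fun i => decide ((m.getD i []).sum = 0))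
  if perm = List.range m.length then m
  else perm.map (fun i => perm.map (fun j => (m.getD i []).getD j 0))

-- ===== PRECONDITION & SPEC =====
-- Pre_ admits matrices that are already grouped (no zero-sum row precedes a
-- nonzero-sum row; A returns them untouched, whatever their shape) or square, the
-- natural domain of this symmetric row/column permutation; it excludes other ragged
-- inputs, where A either raises IndexError (a row shorter than len(m)) or silently
-- truncates longer rows to len(m) columns on the first swap, an artefact of its rebuild.
def Pre_group_terminals (m : List (List Int)) : Prop :=
  (∀ j, j < m.length → ∀ i, i < j → rowS m i = 0 → rowS m j = 0) ∨
  (∀ row ∈ m, row.length = m.length)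
instance (m : List (List Int)) : Decidable (Pre_group_terminals m) := by
  unfold Pre_group_terminals; infer_instance

def pvWitness_group_terminals : List (List Int) := [[0, 0, 0], [1, 2, 3], [0, -1, 1]]

def Spec_group_terminals (m : List (List Int)) (out : List (List Int)) : Prop :=
  out = group_terminals_alt m
instance (m : List (List Int)) (out : List (List Int)) : Decidable (Spec_group_terminals m out) := by
  unfold Spec_group_terminals; infer_instance

-- ===== CLAIM (what is proved, stated in full; the proofs are below) =====
def Claim_equal_group_terminals : Prop := ∀ (m : List (List Int)),
  Dom_group_terminals m → Pre_group_terminals m → Spec_group_terminals m (group_terminals m)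

-- ===== LEMMAS AND PROOFS =====

lemma swapRC_entry (m : List (List Int)) (r z k j : Nat)
    (hk : k < m.length) (hj : j < m.length) :
    ((swap_rows_and_cols m r z).getD k []).getD j 0 =
      (m.getD (Equiv.swap r z k) []).getD (Equiv.swap r z j) 0 := by
  rw [swapRC_getD m r z k hk]
  rw [List.getD_eq_getElem?_getD, List.getElem?_map, List.getElem?_range hj]
  rfl

lemma zeros_after (m : List (List Int)) :
    ∀ (l : List Nat) (z : Nat), findSwap m l (some z) = none → ∀ k ∈ l, rowS m k = 0 := by
  intro l
  induction l with
  | nil => intro z _ k hk; simp at hk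
  | cons a rest ih =>
    intro z h k hk
    by_cases h0 : rowS m a = 0
    · simp only [findSwap, h0, if_pos] at h
      rcases List.mem_cons.mp hk with hka | hkr
      · rwa [hka]
      · exact ih a h k hkr
    · simp [findSwap, h0] at h

lemma none_split (m : List (List Int)) :
    ∀ (l : List Nat), findSwap m l none = none →
    ∃ l1 l2, l = l1 ++ l2 ∧ (∀ k ∈ l1, rowS m k ≠ 0) ∧ (∀ k ∈ l2, rowS m k = 0) := by
  intro l
  induction l with
  | nil => intro _; exact ⟨[], [], rfl, by simp, by simp⟩
  | cons a rest ih =>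
    intro h
    by_cases h0 : rowS m a = 0
    · refine ⟨[], a :: rest, rfl, by simp, ?_⟩
      intro k hk
      rcases List.mem_cons.mp hk with hka | hkr
      · rwa [hka]
      · simp only [findSwap, h0, if_pos] at h
        exact zeros_after m rest a h k hkr
    · simp only [findSwap, h0, if_neg, if_false] at h
      obtain ⟨l1, l2, hl, h1, h2⟩ := ih h
      refine ⟨a :: l1, l2, by rw [List.cons_append, ← hl], ?_, h2⟩
      intro k hk
      rcases List.mem_cons.mp hk with hka | hkr
      · rwa [hka]
      · exact h1 k hkr

lemma perm_eq_range (m : List (List Int)) (l1 l2 : List Nat)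
    (hl : List.range m.length = l1 ++ l2)
    (h1 : ∀ k ∈ l1, rowS m k ≠ 0) (h2 : ∀ k ∈ l2, rowS m k = 0) :
    (List.range m.length).filter (fun i => decide ((m.getD i []).sum ≠ 0))
      ++ (List.range m.length).filter (fun i => decide ((m.getD i []).sum = 0))
      = List.range m.length := by
  rw [hl, List.filter_append, List.filter_append]
  have e1 : l1.filter (fun i => decide ((m.getD i []).sum ≠ 0)) = l1 :=
    List.filter_eq_self.mpr (fun a ha => decide_eq_true (h1 a ha))
  have e2 : l2.filter (fun i => decide ((m.getD i []).sum ≠ 0)) = [] := by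
    apply List.filter_eq_nil_iff.mpr
    intro a ha
    simpa [rowS, List.getD_eq_getElem?_getD] using h2 a ha
  have e3 : l1.filter (fun i => decide ((m.getD i []).sum = 0)) = [] := by
    apply List.filter_eq_nil_iff.mpr
    intro a ha
    simpa [rowS, List.getD_eq_getElem?_getD] using h1 a ha
  have e4 : l2.filter (fun i => decide ((m.getD i []).sum = 0)) = l2 :=
    List.filter_eq_self.mpr (fun a ha => decide_eq_true (h2 a ha))
  rw [e1, e2, e3, e4, List.append_nil, List.nil_append]

lemma map_range_entries (m : List (List Int)) (hsq : SquareP m) :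
    (List.range m.length).map (fun i => (List.range m.length).map
      (fun j => (m.getD i []).getD j 0)) = m := by
  apply List.ext_getElem
  · simp
  · intro i h1 h2
    simp only [List.getElem_map, List.getElem_range]
    have hi : i < m.length := by simpa using h1
    have hrow : (m.getD i []) = m[i] := by
      rw [List.getD_eq_getElem?_getD, List.getElem?_eq_getElem hi]; rfl
    conv_lhs => rw [← square_row_len m hsq i hi, hrow]
    rw [range_map_getD]

lemma alt_unfold (m : List (List Int)) :
    group_terminals_alt m =
      (if ((List.range m.length).filter (fun i => decide ((m.getD i []).sum ≠ 0))
          ++ (List.range m.length).filter (fun i => decide ((m.getD i []).sum = 0)))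
          = List.range m.length then m
       else ((List.range m.length).filter (fun i => decide ((m.getD i []).sum ≠ 0))
          ++ (List.range m.length).filter (fun i => decide ((m.getD i []).sum = 0))).map
          (fun i => ((List.range m.length).filter (fun i => decide ((m.getD i []).sum ≠ 0))
            ++ (List.range m.length).filter (fun i => decide ((m.getD i []).sum = 0))).map
            (fun j => (m.getD i []).getD j 0))) := rfl

lemma alt_eq_self_of_perm (m : List (List Int))
    (hperm : (List.range m.length).filter (fun i => decide ((m.getD i []).sum ≠ 0))
      ++ (List.range m.length).filter (fun i => decide ((m.getD i []).sum = 0))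
      = List.range m.length) :
    group_terminals_alt m = m := by
  rw [alt_unfold, if_pos hperm]

lemma alt_id (m : List (List Int))
    (hfs : findSwap m (List.range m.length) none = none) :
    group_terminals_alt m = m := by
  obtain ⟨l1, l2, hl, h1, h2⟩ := none_split m _ hfs
  exact alt_eq_self_of_perm m (perm_eq_range m l1 l2 hl h1 h2)

def altExpr (m : List (List Int)) : List (List Int) :=
  ((List.range m.length).filter (fun i => decide ((m.getD i []).sum ≠ 0))
    ++ (List.range m.length).filter (fun i => decide ((m.getD i []).sum = 0))).map
    (fun i => ((List.range m.length).filter (fun i => decide ((m.getD i []).sum ≠ 0))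
      ++ (List.range m.length).filter (fun i => decide ((m.getD i []).sum = 0))).map
      (fun j => (m.getD i []).getD j 0))

lemma alt_eq_altExpr (m : List (List Int)) (hsq : SquareP m) :
    group_terminals_alt m = altExpr m := by
  rw [alt_unfold]
  unfold altExpr
  split
  · rename_i hperm
    rw [hperm]
    exact (map_range_entries m hsq).symm
  · rfl

lemma findSwap_none_grouped (m : List (List Int))
    (hg : ∀ j, j < m.length → ∀ i, i < j → rowS m i = 0 → rowS m j = 0) :
    ∀ (l : List Nat) (prev : Option Nat), List.Pairwise (· < ·) l →
    (∀ k ∈ l, k < m.length) →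
    (∀ p, prev = some p → rowS m p = 0 ∧ ∀ k ∈ l, p < k) →
    findSwap m l prev = none := by
  intro l
  induction l with
  | nil => intro prev _ _ _; rfl
  | cons a rest ih =>
    intro prev hsort hmem hinv
    rw [List.pairwise_cons] at hsort
    by_cases h0 : rowS m a = 0
    · simp only [findSwap, h0, if_pos]
      exact ih (some a) hsort.2 (fun k hk => hmem k (List.mem_cons_of_mem a hk))
        (fun p hp => by cases hp; exact ⟨h0, hsort.1⟩)
    · cases hprev : prev with
      | none =>
        simp only [findSwap, h0, if_neg, if_false]
        exact ih none hsort.2 (fun k hk => hmem k (List.mem_cons_of_mem a hk))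
          (fun p hp => by cases hp)
      | some p =>
        obtain ⟨hp0, hpl⟩ := hinv p hprev
        exact absurd (hg a (hmem a List.mem_cons_self) p
          (hpl a List.mem_cons_self) hp0) h0

lemma grouped_A_id (m : List (List Int))
    (hg : ∀ j, j < m.length → ∀ i, i < j → rowS m i = 0 → rowS m j = 0) :
    findSwap m (List.range m.length) none = none := by
  apply findSwap_none_grouped m hg
  · exact List.pairwise_lt_range
  · intro k hk; rwa [List.mem_range] at hk
  · intro p hp; cases hp

lemma range'_two (z : Nat) : List.range' z 2 = [z, z + 1] := by
  simp [List.range'_succ]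

lemma filter_map_swap (q : Nat → Bool) (n r z : Nat)
    (hzr : z + 1 = r) (hr : r < n) (hq : q z = false ∨ q r = false) :
    ((List.range n).filter (fun i => q (Equiv.swap r z i))).map (Equiv.swap r z)
      = (List.range n).filter q := by
  have hdecomp : List.range n = List.range' 0 z ++ (List.range' z 2 ++ List.range' (z + 2) (n - (z + 2))) := by
    rw [List.range'_append_1,
      show List.range' z (2 + (n - (z + 2))) = List.range' (0 + z) (2 + (n - (z + 2))) by
        rw [Nat.zero_add],
      List.range'_append_1, List.range_eq_range']
    congr 1
    omega
  have tlow : ∀ k ∈ List.range' 0 z, Equiv.swap r z k = k := by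
    intro k hk
    rw [List.mem_range'] at hk
    exact Equiv.swap_apply_of_ne_of_ne (by omega) (by omega)
  have thigh : ∀ k ∈ List.range' (z + 2) (n - (z + 2)), Equiv.swap r z k = k := by
    intro k hk
    rw [List.mem_range'] at hk
    exact Equiv.swap_apply_of_ne_of_ne (by omega) (by omega)
  rw [hdecomp]
  simp only [List.filter_append, List.map_append]
  congr 1
  · -- low part: swap is identity
    rw [List.filter_congr (by intro k hk; rw [tlow k hk]),
      List.map_congr_left (fun k hk => tlow k (List.mem_of_mem_filter hk))]
    simp
  congr 1
  · -- middle [z, z+1]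
    rw [range'_two]
    have tz : Equiv.swap r z z = r := Equiv.swap_apply_right r z
    have tz1 : Equiv.swap r z (z + 1) = z := by rw [hzr]; exact Equiv.swap_apply_left r z
    rcases hq with h | h <;>
      simp only [List.filter_cons, List.filter_nil, tz, tz1, h] <;>
      cases hqz : q z <;> cases hqr : q r <;>
        simp_all [tz, tz1, hzr]
  · -- high part: swap is identity
    rw [List.filter_congr (by intro k hk; rw [thigh k hk]),
      List.map_congr_left (fun k hk => thigh k (List.mem_of_mem_filter hk))]
    simp

lemma perm_map_swap (m : List (List Int)) (r z : Nat) (hsq : SquareP m)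
    (hzr : z + 1 = r) (hr : r < m.length)
    (hz0 : rowS m z = 0) (hr0 : rowS m r ≠ 0) :
    (((List.range m.length).filter (fun i => decide (((swap_rows_and_cols m r z).getD i []).sum ≠ 0))
      ++ (List.range m.length).filter (fun i => decide (((swap_rows_and_cols m r z).getD i []).sum = 0))).map (Equiv.swap r z))
      = (List.range m.length).filter (fun i => decide ((m.getD i []).sum ≠ 0))
        ++ (List.range m.length).filter (fun i => decide ((m.getD i []).sum = 0)) := by
  have hz : z < m.length := by omega
  have hlen := (swapRC_square m r z).2
  have hc1 : ∀ i ∈ List.range m.length,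
      (decide (((swap_rows_and_cols m r z).getD i []).sum ≠ 0) : Bool)
        = decide (rowS m (Equiv.swap r z i) ≠ 0) := by
    intro i hi
    rw [List.mem_range] at hi
    rw [show ((swap_rows_and_cols m r z).getD i []).sum = rowS (swap_rows_and_cols m r z) i from rfl,
      rowS_swap m r z i hsq hr hz hi]
  have hc2 : ∀ i ∈ List.range m.length,
      (decide (((swap_rows_and_cols m r z).getD i []).sum = 0) : Bool)
        = decide (rowS m (Equiv.swap r z i) = 0) := by
    intro i hi
    rw [List.mem_range] at hi
    rw [show ((swap_rows_and_cols m r z).getD i []).sum = rowS (swap_rows_and_cols m r z) i from rfl,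
      rowS_swap m r z i hsq hr hz hi]
  rw [List.map_append, List.filter_congr hc1, List.filter_congr hc2]
  congr 1
  · exact filter_map_swap (fun i => decide (rowS m i ≠ 0)) m.length r z hzr hr
      (Or.inl (by simp [hz0]))
  · exact filter_map_swap (fun i => decide (rowS m i = 0)) m.length r z hzr hr
      (Or.inr (by simp [hr0]))

lemma alt_swap (m : List (List Int)) (r z : Nat) (hsq : SquareP m)
    (hzr : z + 1 = r) (hr : r < m.length)
    (hz0 : rowS m z = 0) (hr0 : rowS m r ≠ 0) :
    altExpr (swap_rows_and_cols m r z) = altExpr m := by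
  have hz : z < m.length := by omega
  have hlen := (swapRC_square m r z).2
  unfold altExpr
  rw [hlen]
  set t := Equiv.swap r z with ht
  set P' := (List.range m.length).filter (fun i => decide (((swap_rows_and_cols m r z).getD i []).sum ≠ 0))
    ++ (List.range m.length).filter (fun i => decide (((swap_rows_and_cols m r z).getD i []).sum = 0)) with hP'
  set P := (List.range m.length).filter (fun i => decide ((m.getD i []).sum ≠ 0))
    ++ (List.range m.length).filter (fun i => decide ((m.getD i []).sum = 0)) with hP
  have hPmap : P'.map t = P := perm_map_swap m r z hsq hzr hr hz0 hr0
  have hmem : ∀ i ∈ P', i < m.length := by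
    intro i hi
    rw [hP'] at hi
    rcases List.mem_append.mp hi with h | h <;>
      · have := List.mem_of_mem_filter h; rwa [List.mem_range] at this
  have step1 : ∀ i ∈ P', P'.map (fun j => ((swap_rows_and_cols m r z).getD i []).getD j 0)
      = P.map (fun j => (m.getD (t i) []).getD j 0) := by
    intro i hi
    rw [List.map_congr_left (fun j hj => swapRC_entry m r z i j (hmem i hi) (hmem j hj))]
    rw [show (fun j => (m.getD (t i) []).getD (t j) 0)
        = (fun j => (m.getD (t i) []).getD j 0) ∘ t from rfl,
      ← List.map_map, hPmap]
  rw [List.map_congr_left step1]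
  rw [show (fun i => P.map (fun j => (m.getD (t i) []).getD j 0))
      = (fun i => P.map (fun j => (m.getD i []).getD j 0)) ∘ t from rfl,
    ← List.map_map, hPmap]

theorem main_equiv : ∀ (N : Nat) (m : List (List Int)), muA m ≤ N → SquareP m →
    group_terminals m = altExpr m := by
  intro N
  induction N with
  | zero =>
    intro m hmu hsq
    rw [group_terminals.eq_def]
    split
    · rename_i hfs
      rw [← alt_eq_altExpr m hsq]
      exact (alt_id m hfs).symm
    · rename_i r z hfs
      obtain ⟨hzr, hz0, hr0, hrn⟩ := findSwap_spec m m.length 0 none r z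
        (by intro p hp; cases hp) (by rwa [← List.range_eq_range'])
      have := muA_swap_lt m r z hsq hzr (by omega) hz0 hr0
      omega
  | succ N ih =>
    intro m hmu hsq
    rw [group_terminals.eq_def]
    split
    · rename_i hfs
      rw [← alt_eq_altExpr m hsq]
      exact (alt_id m hfs).symm
    · rename_i r z hfs
      obtain ⟨hzr, hz0, hr0, hrn⟩ := findSwap_spec m m.length 0 none r z
        (by intro p hp; cases hp) (by rwa [← List.range_eq_range'])
      have hrlt : r < m.length := by omega
      have hlt := muA_swap_lt m r z hsq hzr hrlt hz0 hr0
      rw [ih (swap_rows_and_cols m r z) (by omega) (swapRC_square m r z).1]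
      exact alt_swap m r z hsq hzr hrlt hz0 hr0

-- ===== VERDICT (by name: the statement is the Claim_ definition above) =====
theorem group_terminals_spec : Claim_equal_group_terminals := by
  intro m _ hpre
  unfold Spec_group_terminals
  rcases hpre with hg | hsq
  · have hnone := grouped_A_id m hg
    rw [alt_id m hnone, group_terminals.eq_def]
    split
    · rfl
    · rename_i r z heq
      rw [hnone] at heq
      cases heq
  · rw [alt_eq_altExpr m hsq]
    exact main_equiv (muA m) m le_rfl hsq
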